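-- pv_equiv track=rewrite | github.com/y-naught/MD-Web-Reader | markdown_to_html_converter/search_and_replace.py | find_inline_latex
-- ===== SOURCE A (Python) =====
-- def find_occurances_of(delimeter, data):
--     occurances = []
--     index = 0
--
--     while index != -1:
--         cur_index = data.find(delimeter, index)
--         if(cur_index == -1):
--             index = cur_index
--         else:
--             occurances.append(cur_index)
--             index = cur_index + len(delimeter)
--
--     return occurances
--
-- def find_inline_latex(data_in, latex_block_list):
--     occurances = find_occurances_of("$", data_in)
--     remove_occurances = []
--     for x in occurances:
--         for block in latex_block_list:
--             if(x >= block[0] and x <= block[1] + 1):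
--                 remove_occurances.append(x)
--
--     #remove any repeats
--     remove_occurances = [*set(remove_occurances)]
--
--     for repeat in remove_occurances:
--         occurances.remove(repeat)
--
--     paired_values = []
--     for x in range(0, len(occurances), 2):
--         pair = [occurances[x], occurances[x + 1]]
--         paired_values.append(pair)
--
--     return paired_values
-- ===== SOURCE B (Python) =====
-- def find_inline_latex(data_in, latex_block_list):
--     # One pass: keep each '$' position not inside any latex block, then pair consecutive keepers.
--     kept = [i for i, ch in enumerate(data_in)
--             if ch == '$' and not any(b[0] <= i <= b[1] + 1 for b in latex_block_list)]
--     return [[kept[i], kept[i + 1]] for i in range(0, len(kept) - 1, 2)]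
-- ===== Notes on version B (the rewrite author's own statement) =====
-- stated objective: simpler
-- what changed: B replaces A's str.find occurrence loop, the nested removal-list build, set-dedup and repeated list.remove passes by one filtered enumerate scan that keeps '$' positions outside every block, then pairs consecutive kept positions directly.
import Mathlib
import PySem

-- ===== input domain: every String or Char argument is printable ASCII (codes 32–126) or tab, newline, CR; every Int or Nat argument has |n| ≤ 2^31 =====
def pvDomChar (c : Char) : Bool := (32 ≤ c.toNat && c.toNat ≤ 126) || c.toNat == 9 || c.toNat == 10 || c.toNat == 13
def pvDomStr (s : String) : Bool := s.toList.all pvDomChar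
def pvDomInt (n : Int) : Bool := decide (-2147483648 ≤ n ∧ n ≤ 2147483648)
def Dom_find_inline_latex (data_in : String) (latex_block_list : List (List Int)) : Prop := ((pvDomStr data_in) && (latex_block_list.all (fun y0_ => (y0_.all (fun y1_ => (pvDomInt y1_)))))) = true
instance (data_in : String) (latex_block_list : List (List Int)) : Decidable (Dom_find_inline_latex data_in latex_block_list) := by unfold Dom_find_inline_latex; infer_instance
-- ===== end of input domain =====

-- B replaces A's find-loop + removal-list + repeated list.remove passes by a single filtered
-- scan over the character positions, then pairs the kept positions; objective: simpler.


-- ===== PORT A =====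
-- the 'while index != -1' loop of find_occurances_of, specialised to its call site
-- delimeter = "$" (so len(delimeter) = 1); the fuel only makes the same computation total
-- (the index grows by at least 1 per appended hit, so s.length + 2 steps always suffice)
def pvFindOccGo (s : List Char) (index : Int) (acc : List Int) : Nat → List Int
  | 0 => acc
  | fuel + 1 =>
    if index = -1 then acc
    else
      let cur := PySem.Chars.findFrom s ['$'] index none
      if cur = -1 then pvFindOccGo s cur acc fuel
      else pvFindOccGo s (cur + 1) (acc ++ [cur]) fuel

-- block[0] / block[1] are pyGetD with default 0: Pre_ excludes every input on which the Python
-- IndexError is actually reached, and where Python avoids it by `and` short-circuit the first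
-- conjunct is false, so the default value is never read
def find_inline_latex (data_in : String) (latex_block_list : List (List Int)) : List (List Int) :=
  let s := data_in.toList
  let occurances := pvFindOccGo s 0 [] (s.length + 2)
  let remove_occurances := occurances.foldl (fun acc x =>
      latex_block_list.foldl (fun acc2 block =>
        if decide (PySem.List.pyGetD block 0 0 ≤ x) && decide (x ≤ PySem.List.pyGetD block 1 0 + 1)
        then acc2 ++ [x] else acc2) acc) []
  let remove_occurances2 := PySem.Set.ofList remove_occurances
  let occurances2 := remove_occurances2.foldl
      (fun cur repeat_ => (PySem.List.remove? cur repeat_).getD cur) occurances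
  (PySem.List.pyRange 0 (occurances2.length : Int) 2).foldl
      (fun acc x => acc ++ [[PySem.List.pyGetD occurances2 x 0,
                             PySem.List.pyGetD occurances2 (x + 1) 0]]) []

-- ===== PORT B =====
def find_inline_latex_alt (data_in : String) (latex_block_list : List (List Int)) : List (List Int) :=
  let kept := ((PySem.List.enumerate data_in.toList).filter (fun ic =>
      ic.2 == '$' && !(latex_block_list.any (fun b =>
        decide (PySem.List.pyGetD b 0 0 ≤ ic.1) && decide (ic.1 ≤ PySem.List.pyGetD b 1 0 + 1))))).map (·.1)
  (PySem.List.pyRange 0 ((kept.length : Int) - 1) 2).map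
      (fun i => [PySem.List.pyGetD kept i 0, PySem.List.pyGetD kept (i + 1) 0])

-- ===== PRECONDITION & SPEC =====
-- number of '$' positions kept (not inside any block; Python's short-circuit comparison order)
def pvKeptCount (s : List Char) (latex_block_list : List (List Int)) : Nat :=
  (List.range s.length).countP (fun i =>
    (s.getD i ' ' == '$') && !(latex_block_list.any (fun b =>
      decide (PySem.List.pyGetD b 0 0 ≤ (i : Int)) && decide ((i : Int) ≤ PySem.List.pyGetD b 1 0 + 1))))

-- Pre_ excludes exactly the inputs on which A raises IndexError: a block with fewer than 2
-- entries whose block[0] / block[1] lookup is actually reached for some '$' position, and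
-- inputs where the number of '$' delimiters outside blocks is odd (the pairing loop then
-- reads occurances[x + 1] past the end).
def Pre_find_inline_latex (data_in : String) (latex_block_list : List (List Int)) : Prop :=
  (∀ b ∈ latex_block_list, 2 ≤ b.length ∨
      ∀ i ∈ List.range data_in.toList.length, data_in.toList.getD i ' ' = '$' →
        (i : Int) < PySem.List.pyGetD b 0 0) ∧
  Even (pvKeptCount data_in.toList latex_block_list)

instance (data_in : String) (latex_block_list : List (List Int)) : Decidable (Pre_find_inline_latex data_in latex_block_list) := by unfold Pre_find_inline_latex; infer_instance

def pvWitness_find_inline_latex : String × List (List Int) := ("$$ab$cd$", [[0, 1]])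

def Spec_find_inline_latex (data_in : String) (latex_block_list : List (List Int)) (out : List (List Int)) : Prop := out = find_inline_latex_alt data_in latex_block_list
instance (data_in : String) (latex_block_list : List (List Int)) (out : List (List Int)) : Decidable (Spec_find_inline_latex data_in latex_block_list out) := by unfold Spec_find_inline_latex; infer_instance

-- ===== CLAIM (what is proved, stated in full; the proofs are below) =====
def Claim_equal_find_inline_latex : Prop := ∀ (data_in : String) (latex_block_list : List (List Int)), Dom_find_inline_latex data_in latex_block_list → Pre_find_inline_latex data_in latex_block_list → Spec_find_inline_latex data_in latex_block_list (find_inline_latex data_in latex_block_list)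

-- ===== LEMMAS AND PROOFS =====

theorem pv_singleton_prefix (c : Char) (l : List Char) : [c] <+: l ↔ l.head? = some c := by
  cases l with
  | nil => simp
  | cons a t => simp [List.cons_prefix_cons, eq_comm]

-- the '$' positions of s at index ≥ k, in order, as Ints
def pvDollarsFrom (s : List Char) (k : Nat) : List Int :=
  ((List.range s.length).filter (fun i => decide (k ≤ i) && (s.getD i ' ' == '$'))).map (fun (i : Nat) => (i : Int))

theorem pv_prefix_drop (s : List Char) (i : Nat) :
    ['$'] <+: s.drop i ↔ i < s.length ∧ s.getD i ' ' = '$' := by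
  rw [pv_singleton_prefix, List.head?_drop, List.getD_eq_getElem?_getD]
  constructor
  · intro h
    have hlt : i < s.length := by
      by_contra hge
      rw [List.getElem?_eq_none (by omega)] at h
      simp at h
    refine ⟨hlt, ?_⟩
    simp [h]
  · rintro ⟨hlt, hd⟩
    rw [List.getElem?_eq_getElem hlt] at hd ⊢
    simpa using hd

theorem pv_filter_split (s : List Char) (k i : Nat) (hi : i < s.length) (hki : k ≤ i)
    (hP : s.getD i ' ' = '$')
    (hmin : ∀ j, k ≤ j → j < i → ¬ s.getD j ' ' = '$') :
    (List.range s.length).filter (fun j => decide (k ≤ j) && (s.getD j ' ' == '$'))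
      = i :: (List.range s.length).filter (fun j => decide (i + 1 ≤ j) && (s.getD j ' ' == '$')) := by
  simp only [List.getD_eq_getElem?_getD] at hP hmin ⊢
  have hn : s.length = (i + 1) + (s.length - (i + 1)) := by omega
  rw [hn, List.range_add, List.filter_append, List.filter_append, List.range_succ,
    List.filter_append, List.filter_append]
  have e1 : (List.range i).filter (fun j => decide (k ≤ j) && (s[j]?.getD ' ' == '$')) = [] := by
    rw [List.filter_eq_nil_iff]
    intro j hj
    rcases Nat.lt_or_ge j k with h | h
    · simp [Nat.not_le.mpr h]
    · simp [h, hmin j h (List.mem_range.mp hj)]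
  have e2 : (List.range (i + 1)).filter (fun j => decide (i + 1 ≤ j) && (s[j]?.getD ' ' == '$')) = [] := by
    rw [List.filter_eq_nil_iff]
    intro j hj
    simp [Nat.not_le.mpr (List.mem_range.mp hj)]
  have e3 : [i].filter (fun j => decide (k ≤ j) && (s[j]?.getD ' ' == '$')) = [i] := by
    simp [hki, hP]
  have e4 : ((List.range (s.length - (i + 1))).map (fun x => i + 1 + x)).filter
        (fun j => decide (k ≤ j) && (s[j]?.getD ' ' == '$'))
      = ((List.range (s.length - (i + 1))).map (fun x => i + 1 + x)).filter
        (fun j => decide (i + 1 ≤ j) && (s[j]?.getD ' ' == '$')) := by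
    refine List.filter_congr (fun j hj => ?_)
    rcases List.mem_map.mp hj with ⟨x, _, rfl⟩
    have h1 : k ≤ i + 1 + x := by omega
    have h2 : i + 1 ≤ i + 1 + x := by omega
    simp [h1, h2]
  have e5 : (List.range i).filter (fun j => decide (i + 1 ≤ j) && (s[j]?.getD ' ' == '$')) = [] := by
    rw [List.filter_eq_nil_iff]
    intro j hj
    have hji := List.mem_range.mp hj
    simp only [Bool.and_eq_true, decide_eq_true_eq, not_and]
    intro h
    omega
  have e6 : [i].filter (fun j => decide (i + 1 ≤ j) && (s[j]?.getD ' ' == '$')) = [] := by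
    simp
  rw [e1, e3, e4, e5, e6]
  simp

theorem pv_infix_drop (s : List Char) (k : Nat) :
    ['$'] <:+: s.drop k ↔ ∃ i, k ≤ i ∧ i < s.length ∧ s.getD i ' ' = '$' := by
  rw [List.singleton_infix_iff]
  constructor
  · intro h
    rcases List.mem_iff_getElem.mp h with ⟨j, hj, hget⟩
    have hkj : k + j < s.length := by have := List.length_drop (l := s) (i := k); omega
    refine ⟨k + j, by omega, hkj, ?_⟩
    rw [List.getElem_drop] at hget
    simp [List.getD_eq_getElem?_getD, List.getElem?_eq_getElem hkj, hget]
  · rintro ⟨i, hki, hi, hd⟩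
    have hlt : i - k < (s.drop k).length := by simp; omega
    have hg : (s.drop k)[i - k]'hlt = '$' := by
      rw [List.getElem_drop]
      simp only [List.getD_eq_getElem?_getD] at hd
      have hik : k + (i - k) = i := by omega
      simp_rw [hik]
      rw [List.getElem?_eq_getElem hi] at hd
      simpa using hd
    exact hg ▸ List.getElem_mem _

theorem pv_findOccGo_eq (s : List Char) (fuel : Nat) :
    ∀ (k : Nat) (acc : List Int), k ≤ s.length → s.length + 2 - k ≤ fuel →
      pvFindOccGo s (k : Int) acc fuel = acc ++ pvDollarsFrom s k := by
  induction fuel with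
  | zero => intro k acc hk hf; omega
  | succ f ih =>
    intro k acc hk hf
    have hknm : ¬((k : Int) = -1) := by omega
    rw [pvFindOccGo, if_neg hknm]
    simp only []
    by_cases hc : PySem.Chars.findFrom s ['$'] (k : Int) none = -1
    · rw [if_pos hc, hc]
      obtain ⟨f', rfl⟩ : ∃ f', f = f' + 1 := ⟨f - 1, by omega⟩
      rw [pvFindOccGo, if_pos rfl]
      have hno : ¬ ['$'] <:+: s.drop k :=
        (PySem.Chars.findFrom_natCast_eq_neg_one_iff s ['$'] k hk).mp hc
      rw [pv_infix_drop] at hno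
      push Not at hno
      have hnil : pvDollarsFrom s k = [] := by
        unfold pvDollarsFrom
        rw [List.filter_eq_nil_iff.mpr ?_]
        · simp
        · intro j hj
          simp only [Bool.and_eq_true, decide_eq_true_eq, not_and, beq_iff_eq]
          intro hkj
          exact hno j hkj (List.mem_range.mp hj)
      rw [hnil, List.append_nil]
    · rw [if_neg hc]
      obtain ⟨hkc, hpre, hmin⟩ := PySem.Chars.findFrom_natCast_spec s ['$'] k hk hc
      have hcur0 : (0 : Int) ≤ PySem.Chars.findFrom s ['$'] (k : Int) none :=
        le_trans (by omega) hkc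
      set cur := PySem.Chars.findFrom s ['$'] (k : Int) none with hcurdef
      set i := cur.toNat with hidef
      have hcuri : cur = (i : Int) := (Int.toNat_of_nonneg hcur0).symm
      rw [pv_prefix_drop] at hpre
      obtain ⟨hin, hdol⟩ := hpre
      have hki : k ≤ i := by omega
      rw [hcuri, show ((i : Int) + 1) = ((i + 1 : Nat) : Int) by push_cast; ring,
        ih (i + 1) (acc ++ [(i : Int)]) (by omega) (by omega)]
      have hmin' : ∀ j, k ≤ j → j < i → ¬ s.getD j ' ' = '$' := by
        intro j h1 h2 hd
        exact hmin j h1 h2 ((pv_prefix_drop s j).mpr ⟨by omega, hd⟩)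
      unfold pvDollarsFrom
      rw [pv_filter_split s k i hin hki hdol hmin']
      simp

theorem pv_fold_replicate_add (s : List Int) (x : Int) (c : Nat) :
    (List.replicate c x).foldl PySem.Set.add s = if c = 0 then s else PySem.Set.add s x := by
  induction c generalizing s with
  | zero => simp
  | succ c ih =>
    rw [List.replicate_succ, List.foldl_cons, ih]
    by_cases hc : c = 0
    · simp [hc]
    · rw [if_neg hc, if_neg (Nat.succ_ne_zero c),
        PySem.Set.add_of_mem ((PySem.Set.mem_add s x x).mpr (Or.inr rfl))]

theorem pv_setOfList_flatMap (l : List Int) (m : Int → Nat) (s : List Int)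
    (hnd : l.Nodup) (hdisj : ∀ y ∈ l, y ∉ s) :
    (l.flatMap (fun x => List.replicate (m x) x)).foldl PySem.Set.add s
      = s ++ l.filter (fun x => decide (0 < m x)) := by
  induction l generalizing s with
  | nil => simp
  | cons x t ih =>
    rw [List.flatMap_cons, List.foldl_append, pv_fold_replicate_add]
    rcases List.nodup_cons.mp hnd with ⟨hx, hnd'⟩
    by_cases hc : m x = 0
    · rw [if_pos hc, ih s hnd' (fun y hy => hdisj y (List.mem_cons_of_mem x hy))]
      simp [hc]
    · rw [if_neg hc, PySem.Set.add_of_not_mem (hdisj x List.mem_cons_self),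
        ih (s ++ [x]) hnd' (fun y hy => by
          simp only [List.mem_append, List.mem_singleton]
          rintro (h | rfl)
          · exact hdisj y (List.mem_cons_of_mem x hy) h
          · exact hx hy)]
      simp [Nat.pos_of_ne_zero hc]

theorem pv_erase_fold_of_ne (sub : List Int) (x : Int) (t : List Int)
    (hne : ∀ r ∈ sub, r ≠ x) (hmem : ∀ r ∈ sub, r ∈ t) (hnd : sub.Nodup) :
    sub.foldl (fun cur r => (PySem.List.remove? cur r).getD cur) (x :: t)
      = x :: sub.foldl (fun cur r => (PySem.List.remove? cur r).getD cur) t := by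
  induction sub generalizing t with
  | nil => rfl
  | cons r rs ih =>
    rcases List.nodup_cons.mp hnd with ⟨hr, hnd'⟩
    have hrt : r ∈ t := hmem r List.mem_cons_self
    have hrx : r ≠ x := hne r List.mem_cons_self
    have h1 : (PySem.List.remove? (x :: t) r).getD (x :: t) = x :: t.erase r := by
      rw [PySem.List.remove?_eq_some_erase _ _ (List.mem_cons_of_mem x hrt),
        Option.getD_some, List.erase_cons_tail (by simpa using fun h => hrx h.symm)]
    have h2 : (PySem.List.remove? t r).getD t = t.erase r := by
      rw [PySem.List.remove?_eq_some_erase _ _ hrt]; rfl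
    simp only [List.foldl_cons, h1, h2]
    exact ih (t.erase r) (fun q hq => hne q (List.mem_cons_of_mem r hq))
      (fun q hq => (List.mem_erase_of_ne (fun h : q = r => hr (h ▸ hq))).mpr
        (hmem q (List.mem_cons_of_mem r hq)))
      hnd'

theorem pv_erase_fold (l : List Int) (p : Int → Bool) (h : l.Nodup) :
    (l.filter p).foldl (fun cur r => (PySem.List.remove? cur r).getD cur) l
      = l.filter (fun x => !p x) := by
  induction l with
  | nil => rfl
  | cons x t ih =>
    rcases List.nodup_cons.mp h with ⟨hx, hnd'⟩
    by_cases hp : p x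
    · have h1 : (PySem.List.remove? (x :: t) x).getD (x :: t) = t := by
        rw [PySem.List.remove?_eq_some_erase _ _ List.mem_cons_self, Option.getD_some,
          List.erase_cons_head]
      rw [List.filter_cons_of_pos hp, List.foldl_cons, h1, List.filter_cons_of_neg (by simp [hp])]
      exact ih hnd'
    · rw [List.filter_cons_of_neg hp, List.filter_cons_of_pos (by simp [hp]),
        pv_erase_fold_of_ne _ _ _ (fun r hr => fun hrx : r = x => hx (hrx ▸ List.mem_of_mem_filter hr))
          (fun r hr => List.mem_of_mem_filter hr) (List.Nodup.filter _ hnd'), ih hnd']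

theorem pv_enumerate_eq (s : List Char) (k : Nat) :
    PySem.List.enumerate s (k : Int)
      = (List.range s.length).map (fun i => (((k + i : Nat) : Int), s.getD i ' ')) := by
  induction s generalizing k with
  | nil => simp [PySem.List.enumerate_nil]
  | cons c t ih =>
    rw [PySem.List.enumerate_cons]
    have h1 : ((k : Int) + 1) = ((k + 1 : Nat) : Int) := by push_cast; ring
    rw [h1, ih (k + 1)]
    simp only [List.length_cons, List.range_succ_eq_map, List.map_cons, List.map_map]
    refine congrArg₂ _ (by simp) ?_
    refine List.map_congr_left (fun i _ => ?_)
    simp only [Function.comp_apply, List.getD_cons_succ]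
    refine congrArg₂ _ ?_ rfl
    congr 1
    omega

theorem pv_pyRange_two_even (n : Nat) (hn : Even n) :
    PySem.List.pyRange 0 (n : Int) 2 = PySem.List.pyRange 0 ((n : Int) - 1) 2 := by
  rw [PySem.List.pyRange_of_pos 0 (n : Int) (by norm_num),
      PySem.List.pyRange_of_pos 0 ((n : Int) - 1) (by norm_num)]
  congr 1
  rcases hn with ⟨m, rfl⟩
  split_ifs <;> congr 1 <;> omega

-- ===== VERDICT (by name: the statement is the Claim_ definition above) =====
theorem find_inline_latex_spec : Claim_equal_find_inline_latex := by
  intro data_in blocks _hDom hPre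
  obtain ⟨_, hEven⟩ := hPre
  unfold Spec_find_inline_latex find_inline_latex find_inline_latex_alt
  set s := data_in.toList with hs
  have hocc : pvFindOccGo s 0 [] (s.length + 2) = pvDollarsFrom s 0 := by
    simpa using pv_findOccGo_eq s (s.length + 2) 0 [] (by omega) (by omega)
  have hnd : (pvDollarsFrom s 0).Nodup := by
    unfold pvDollarsFrom
    exact List.Nodup.map (fun a b h => by exact_mod_cast h) (List.Nodup.filter _ List.nodup_range)
  have hremove :
      List.foldl (fun cur repeat_ => (PySem.List.remove? cur repeat_).getD cur) (pvDollarsFrom s 0)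
        (PySem.Set.ofList
          (List.flatMap
            (fun x => List.replicate
              (List.filter (fun b =>
                  decide (PySem.List.pyGetD b 0 0 ≤ x) && decide (x ≤ PySem.List.pyGetD b 1 0 + 1))
                blocks).length x)
            (pvDollarsFrom s 0)))
      = (pvDollarsFrom s 0).filter (fun x => !(blocks.any (fun b =>
          decide (PySem.List.pyGetD b 0 0 ≤ x) && decide (x ≤ PySem.List.pyGetD b 1 0 + 1)))) := by
    rw [PySem.Set.ofList_eq_foldl,
      pv_setOfList_flatMap _ _ [] hnd (by simp), List.nil_append]
    have hpb : ∀ x : Int,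
        (decide (0 < (List.filter (fun b =>
            decide (PySem.List.pyGetD b 0 0 ≤ x) && decide (x ≤ PySem.List.pyGetD b 1 0 + 1))
          blocks).length))
        = blocks.any (fun b =>
            decide (PySem.List.pyGetD b 0 0 ≤ x) && decide (x ≤ PySem.List.pyGetD b 1 0 + 1)) := by
      intro x
      rcases hany : blocks.any (fun b =>
          decide (PySem.List.pyGetD b 0 0 ≤ x) && decide (x ≤ PySem.List.pyGetD b 1 0 + 1)) with _ | _
      · simp only [List.any_eq_false] at hany
        simp [List.filter_eq_nil_iff.mpr hany]
      · simp only [List.any_eq_true] at hany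
        rcases hany with ⟨b, hb, hpb⟩
        have hbm : b ∈ blocks.filter (fun b =>
            decide (PySem.List.pyGetD b 0 0 ≤ x) && decide (x ≤ PySem.List.pyGetD b 1 0 + 1)) :=
          List.mem_filter.mpr ⟨hb, hpb⟩
        simp [List.length_pos_of_mem hbm]
    rw [List.filter_congr (fun x _ => hpb x)]
    exact pv_erase_fold _ _ hnd
  have henum : PySem.List.enumerate s = (List.range s.length).map (fun (i : Nat) => ((i : Int), s.getD i ' ')) := by
    simpa using pv_enumerate_eq s 0
  have hlist :
      (pvDollarsFrom s 0).filter (fun x => !(blocks.any (fun b =>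
          decide (PySem.List.pyGetD b 0 0 ≤ x) && decide (x ≤ PySem.List.pyGetD b 1 0 + 1))))
        = ((PySem.List.enumerate s).filter (fun ic => ic.2 == '$' && !(blocks.any (fun b =>
            decide (PySem.List.pyGetD b 0 0 ≤ ic.1) && decide (ic.1 ≤ PySem.List.pyGetD b 1 0 + 1))))).map (fun x => x.1) := by
    unfold pvDollarsFrom
    rw [henum, List.filter_map, List.filter_map, List.map_map, List.filter_filter]
    congr 1
    exact List.filter_congr fun i _ => by simp [Bool.and_comm]
  have hK : (((PySem.List.enumerate s).filter (fun ic => ic.2 == '$' && !(blocks.any (fun b =>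
        decide (PySem.List.pyGetD b 0 0 ≤ ic.1) && decide (ic.1 ≤ PySem.List.pyGetD b 1 0 + 1))))).map (fun x => x.1)).length
      = pvKeptCount s blocks := by
    rw [← hlist]
    unfold pvDollarsFrom pvKeptCount
    rw [List.filter_map, List.length_map, List.filter_filter,
      List.countP_eq_length_filter]
    exact congrArg List.length (List.filter_congr fun i _ => by simp [Bool.and_comm])
  simp only [hocc, PySem.List.foldl_append_if, PySem.List.foldl_append_eq_flatMap,
    List.map_const', hremove, hlist, List.nil_append, ← List.map_eq_flatMap]
  rw [pv_pyRange_two_even _ (by rw [hK]; exact hEven)]
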